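-- pv_equiv track=rewrite | github.com/mfocuz/coding-challs | AoC/2023/day3_gear_ratios.py | look_right
-- ===== SOURCE A (Python) =====
-- def look_right(engine, y, x, number_piece):
--     if 0 <= y <= len(engine) - 1 and x <= len(engine[0])-1:
--         if (engine[y][x]).isdigit():
--             number_piece = number_piece + engine[y][x]
--             return look_right(engine, y, x+1, number_piece)
--         else:
--             return number_piece
--     else:
--         return number_piece
-- ===== SOURCE B (Python) =====
-- def look_right(engine, y, x, number_piece):
--     result = number_piece
--     if 0 <= y <= len(engine) - 1:
--         row = engine[y]
--         last = len(engine[0]) - 1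
--         while x <= last and row[x].isdigit():
--             result += row[x]
--             x += 1
--     return result
-- ===== Notes on version B (the rewrite author's own statement) =====
-- stated objective: idiomatic
-- what changed: Replaces A's tail recursion (which re-checks the full bounds guard and rebuilds call state on every character) by a single iterative while loop with the row and the last admissible column hoisted out, accumulating into a local result string.
import Mathlib
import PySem

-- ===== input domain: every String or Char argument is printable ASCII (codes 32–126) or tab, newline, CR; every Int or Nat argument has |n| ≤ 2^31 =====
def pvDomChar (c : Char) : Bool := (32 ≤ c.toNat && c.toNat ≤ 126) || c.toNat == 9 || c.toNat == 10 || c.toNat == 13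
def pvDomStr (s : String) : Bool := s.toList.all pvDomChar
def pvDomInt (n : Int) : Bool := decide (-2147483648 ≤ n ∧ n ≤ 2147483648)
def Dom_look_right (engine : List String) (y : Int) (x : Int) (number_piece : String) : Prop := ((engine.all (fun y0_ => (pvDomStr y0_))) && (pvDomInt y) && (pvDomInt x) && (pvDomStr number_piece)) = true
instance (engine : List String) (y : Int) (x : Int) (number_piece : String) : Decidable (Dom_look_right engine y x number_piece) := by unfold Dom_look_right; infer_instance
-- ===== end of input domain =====

-- B replaces A's tail recursion (which re-checks the whole guard and rebuilds state every call) by a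
-- single while loop with the row and the column bound hoisted out; same value, same exceptions (idiomatic rewrite).

-- ===== PORT A =====
-- A's recursion, step for step; the accumulator string is carried as its character list
-- (String.ofList/toList at the wrapper), the full guard is re-evaluated at every call just as in A.
-- Python raises IndexError where pyGet? is none; the port returns the accumulator there (outside Pre_).
def lookRightA (engine : List String) (y : Int) (x : Int) (acc : List Char) : List Char :=
  if _h : 0 ≤ y ∧ y ≤ (engine.length : Int) - 1 ∧ x ≤ ((engine.headD "").toList.length : Int) - 1 then
    match PySem.List.pyGet? ((PySem.List.pyGet? engine y).getD "").toList x with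
    | some c =>
        if PySem.Chars.isdigit c then
          lookRightA engine y (x + 1) (acc ++ [c])
        else acc
    | none => acc
  else acc
termination_by (((engine.headD "").toList.length : Int) - x).toNat
decreasing_by omega

def look_right (engine : List String) (y : Int) (x : Int) (number_piece : String) : String :=
  String.ofList (lookRightA engine y x number_piece.toList)

-- ===== PORT B =====
-- B's while loop over x with the row and the last admissible column hoisted out of the loop.
def lrScan (row : List Char) (last : Int) (x : Int) (res : List Char) : List Char :=
  if _h : x ≤ last then
    match PySem.List.pyGet? row x with
    | some c =>
        if PySem.Chars.isdigit c then lrScan row last (x + 1) (res ++ [c]) else res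
    | none => res
  else res
termination_by (last + 1 - x).toNat
decreasing_by omega

def look_right_alt (engine : List String) (y : Int) (x : Int) (number_piece : String) : String :=
  if 0 ≤ y ∧ y ≤ (engine.length : Int) - 1 then
    String.ofList (lrScan ((PySem.List.pyGet? engine y).getD "").toList
      (((engine.headD "").toList.length : Int) - 1) x number_piece.toList)
  else number_piece

-- ===== PRECONDITION & SPEC =====
-- Pre_ excludes exactly the inputs on which Python A raises IndexError (indexing a ragged/short row,
-- or a negative x beyond -len(row)); both Pythons raise there, so nothing is claimed about them.
def Pre_look_right (engine : List String) (y : Int) (x : Int) (number_piece : String) : Prop :=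
  ¬ ( (0 ≤ y ∧ y ≤ (engine.length : Int) - 1 ∧ x ≤ ((engine.headD "").toList.length : Int) - 1) ∧
      ( x < -((((PySem.List.pyGet? engine y).getD "").toList.length : Int)) ∨
        ( (((PySem.List.pyGet? engine y).getD "").toList.length : Int) < ((engine.headD "").toList.length : Int) ∧
          (if 0 ≤ x
            then (((PySem.List.pyGet? engine y).getD "").toList.drop x.toNat).all PySem.Chars.isdigit
            else ((PySem.List.pyGet? engine y).getD "").toList.all PySem.Chars.isdigit) = true ) ) )
instance (engine : List String) (y : Int) (x : Int) (number_piece : String) : Decidable (Pre_look_right engine y x number_piece) := by unfold Pre_look_right; infer_instance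

def pvWitness_look_right : List String × Int × Int × String := (["467..114.."], 0, 0, "")

def Spec_look_right (engine : List String) (y : Int) (x : Int) (number_piece : String) (out : String) : Prop := out = look_right_alt engine y x number_piece
instance (engine : List String) (y : Int) (x : Int) (number_piece : String) (out : String) : Decidable (Spec_look_right engine y x number_piece out) := by unfold Spec_look_right; infer_instance

-- ===== CLAIM (what is proved, stated in full; the proofs are below) =====
def Claim_equal_look_right : Prop := ∀ (engine : List String) (y : Int) (x : Int) (number_piece : String), Dom_look_right engine y x number_piece → Pre_look_right engine y x number_piece → Spec_look_right engine y x number_piece (look_right engine y x number_piece)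

-- ===== LEMMAS AND PROOFS =====

-- With the row bound fixed and y in range, A's recursion and B's loop step identically.
theorem lookRightA_eq_lrScan (engine : List String) (y : Int)
    (hy : 0 ≤ y ∧ y ≤ (engine.length : Int) - 1) :
    ∀ (k : Nat) (x : Int) (acc : List Char),
      (((engine.headD "").toList.length : Int) - x).toNat ≤ k →
      lookRightA engine y x acc =
        lrScan ((PySem.List.pyGet? engine y).getD "").toList
          (((engine.headD "").toList.length : Int) - 1) x acc := by
  intro k
  induction k with
  | zero =>
      intro x acc hk
      rw [lookRightA, lrScan]
      rw [dif_neg (by omega), dif_neg (by omega)]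
  | succ k ih =>
      intro x acc hk
      rw [lookRightA, lrScan]
      by_cases hx : x ≤ ((engine.headD "").toList.length : Int) - 1
      · rw [dif_pos ⟨hy.1, hy.2, hx⟩, dif_pos hx]
        cases PySem.List.pyGet? ((PySem.List.pyGet? engine y).getD "").toList x with
        | none => rfl
        | some c =>
            by_cases hd : PySem.Chars.isdigit c
            · simp only [hd, if_true]
              exact ih (x + 1) (acc ++ [c]) (by omega)
            · simp [hd]
      · rw [dif_neg (fun hcon => hx hcon.2.2), dif_neg hx]

-- ===== VERDICT (by name: the statement is the Claim_ definition above) =====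
theorem look_right_spec : Claim_equal_look_right := by
  intro engine y x number_piece _ _
  unfold Spec_look_right look_right look_right_alt
  by_cases hy : 0 ≤ y ∧ y ≤ (engine.length : Int) - 1
  · rw [if_pos hy, lookRightA_eq_lrScan engine y hy
      ((((engine.headD "").toList.length : Int) - x).toNat) x number_piece.toList le_rfl]
  · rw [if_neg hy, lookRightA]
    rw [dif_neg (by tauto)]
    exact String.ofList_toList
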